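-- pv_equiv track=rewrite | github.com/namanag97/shannon-insight | src/shannon_insight/graph/algorithms.py | compute_blast_radius
-- ===== SOURCE A (Python) =====
-- from collections import defaultdict, deque
--
-- def compute_blast_radius(reverse_adj: dict[str, list[str]]) -> dict[str, set[str]]:
--     """Compute blast radius: for each file, what files are transitively affected.
--
--     Uses BFS on the reverse graph. If A imports B, then changing B
--     affects A. So we follow reverse edges from each node.
--     """
--     blast: dict[str, set[str]] = {}
--
--     for start_node in reverse_adj:
--         visited: set[str] = set()
--         queue: deque[str] = deque(reverse_adj.get(start_node, []))
--         while queue: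
--             node = queue.popleft()
--             if node in visited:
--                 continue
--             visited.add(node)
--             queue.extend(n for n in reverse_adj.get(node, []) if n not in visited)
--         blast[start_node] = visited
--
--     return blast
-- ===== SOURCE B (Python) =====
-- def compute_blast_radius(reverse_adj: dict[str, list[str]]) -> dict[str, set[str]]:
--     """Blast radius by Kleene fixpoint iteration: for each node, iterate the
--     one-step expansion R -> dedup(R + successors(R)) on the whole current set
--     until it stops growing.  No queue, no visited set, no frontier."""
--     def successors(seq):
--         return [m for n in seq for m in reverse_adj.get(n, [])]
--
--     blast: dict[str, set[str]] = {}
--     for start_node in reverse_adj: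
--         seq = list(dict.fromkeys(reverse_adj.get(start_node, [])))
--         while True:
--             ext = list(dict.fromkeys(seq + successors(seq)))
--             if len(ext) == len(seq):
--                 break
--             seq = ext
--         blast[start_node] = set(seq)
--     return blast
-- ===== Notes on version B (the rewrite author's own statement) =====
-- stated objective: alternative
-- what changed: The per-node deque BFS (visited set, queue, pop-time duplicate skipping) is replaced by Kleene fixpoint iteration: for each node, repeatedly map the whole current set through the one-step successor expansion R -> dedup(R + successors(R)) until its size stops growing; there is no queue, no visited set and no frontier, only a pure expansion function iterated to a fixpoint.
import Mathlib
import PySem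

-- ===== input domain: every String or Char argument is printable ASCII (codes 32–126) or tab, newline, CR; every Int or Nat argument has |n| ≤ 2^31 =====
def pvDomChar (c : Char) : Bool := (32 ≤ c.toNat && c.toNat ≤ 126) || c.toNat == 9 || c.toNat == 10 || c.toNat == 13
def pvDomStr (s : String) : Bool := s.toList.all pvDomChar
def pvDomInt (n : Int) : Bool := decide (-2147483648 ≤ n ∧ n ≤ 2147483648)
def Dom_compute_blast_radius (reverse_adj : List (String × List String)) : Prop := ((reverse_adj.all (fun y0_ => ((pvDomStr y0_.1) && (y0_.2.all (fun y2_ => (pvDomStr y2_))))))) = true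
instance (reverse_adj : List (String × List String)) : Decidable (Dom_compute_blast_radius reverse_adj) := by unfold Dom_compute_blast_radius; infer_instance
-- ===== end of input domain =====

-- ===== PORT A =====
-- B replaces the per-node deque BFS by Kleene fixpoint iteration of the one-step
-- successor expansion; alternative decomposition, same results.

-- shared helper: reverse_adj.get(k, [])
def pvAdjGet (adj : List (String × List String)) (k : String) : List String :=
  PySem.Dict.getD (PySem.Dict.mk adj) k []

-- termination helpers (used only in decreasing_by of the recursive defs/theorems below)
def pvU (adj : List (String × List String)) : List String :=
  adj.map Prod.fst ++ adj.flatMap Prod.snd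

def pvMu (adj : List (String × List String)) (v : PySem.Set String) : Nat :=
  (pvU adj).countP (fun x => !decide (x ∈ v))

theorem pvAdjGet_eq_nil {adj : List (String × List String)} {n : String}
    (h : n ∉ adj.map Prod.fst) : pvAdjGet adj n = [] := by
  have hk : (PySem.Dict.mk adj).get? n = none := by
    rw [PySem.Dict.get?_eq_none_iff_not_mem_keys]
    simpa [PySem.Dict.keys] using h
  simp [pvAdjGet, PySem.Dict.getD_eq_get?_getD, hk]

theorem pvU_not_key {adj : List (String × List String)} {n : String}
    (h : n ∉ pvU adj) : pvAdjGet adj n = [] :=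
  pvAdjGet_eq_nil (fun hk => h (List.mem_append_left _ hk))

theorem mem_pvAdjGet_pvU {adj : List (String × List String)} {n x : String}
    (h : x ∈ pvAdjGet adj n) : x ∈ pvU adj := by
  rw [pvAdjGet, PySem.Dict.getD_eq_get?_getD] at h
  cases hg : (PySem.Dict.mk adj).get? n with
  | none => rw [hg] at h; cases h
  | some v =>
    rw [hg] at h
    have hmem : (n, v) ∈ adj := by
      have := PySem.Dict.mem_items_of_get?_eq_some _ hg
      simpa [PySem.Dict.items, PySem.Dict.mk] using this
    exact List.mem_append_right _ (List.mem_flatMap.mpr ⟨(n, v), hmem, h⟩)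

theorem countP_notMem_lt {v w : List String} (hvw : ∀ x ∈ v, x ∈ w)
    {x : String} {l : List String} (hxl : x ∈ l) (hxw : x ∈ w) (hxv : x ∉ v) :
    l.countP (fun y => !decide (y ∈ w)) < l.countP (fun y => !decide (y ∈ v)) := by
  induction l with
  | nil => cases hxl
  | cons a t ih =>
    have hle : t.countP (fun y => !decide (y ∈ w)) ≤ t.countP (fun y => !decide (y ∈ v)) := by
      apply List.countP_mono_left
      intro y _ hy
      simp only [Bool.not_eq_eq_eq_not, Bool.not_true, decide_eq_false_iff_not] at hy ⊢
      exact fun hyv => hy (hvw y hyv)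
    rcases List.mem_cons.mp hxl with rfl | hat
    · have e1 : (!decide (x ∈ w)) = false := by simp [hxw]
      have e2 : (!decide (x ∈ v)) = true := by simp [hxv]
      simp only [List.countP_cons, e1, e2]
      simp only [Bool.false_eq_true, if_false, if_true]
      omega
    · have := ih hat
      simp only [List.countP_cons]
      have hone : (if (!decide (a ∈ w)) = true then 1 else 0) ≤ (if (!decide (a ∈ v)) = true then 1 else 0) := by
        by_cases hav : a ∈ v
        · simp [hvw a hav, hav]
        · by_cases haw : a ∈ w <;> simp [hav, haw]
      omega

theorem countP_notMem_le {v w : List String} (hvw : ∀ x ∈ v, x ∈ w) (l : List String) :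
    l.countP (fun y => !decide (y ∈ w)) ≤ l.countP (fun y => !decide (y ∈ v)) := by
  apply List.countP_mono_left
  intro y _ hy
  simp only [Bool.not_eq_eq_eq_not, Bool.not_true, decide_eq_false_iff_not] at hy ⊢
  exact fun hyv => hy (hvw y hyv)

theorem pvMu_lt {adj : List (String × List String)} {v w : PySem.Set String}
    (hvw : ∀ x ∈ v, x ∈ w) {x : String} (hxU : x ∈ pvU adj) (hxw : x ∈ w) (hxv : x ∉ v) :
    pvMu adj w < pvMu adj v :=
  countP_notMem_lt hvw hxU hxw hxv

theorem pvMu_congr {adj : List (String × List String)} {v w : PySem.Set String}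
    (h : ∀ x ∈ pvU adj, (x ∈ v ↔ x ∈ w)) : pvMu adj v = pvMu adj w := by
  apply List.countP_congr
  intro x hx
  simp [h x hx]

-- port of A's inner loop: deque-based BFS, duplicates skipped at pop time
def bfsQ (adj : List (String × List String)) (visited : PySem.Set String)
    (queue : List String) : PySem.Set String :=
  match queue with
  | [] => visited
  | node :: rest =>
    if h : node ∈ visited then
      bfsQ adj visited rest
    else
      let v' := PySem.Set.add visited node
      bfsQ adj v' (rest ++ (pvAdjGet adj node).filter (fun m => decide (m ∉ v')))
termination_by (pvMu adj visited, queue.length)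
decreasing_by
  · exact Prod.Lex.right _ (by simp)
  · by_cases hU : node ∈ pvU adj
    · apply Prod.Lex.left
      exact pvMu_lt (v := visited)
        (fun x hx => by simp [PySem.Set.add_of_not_mem h, hx]) hU
        (by simp [PySem.Set.add_of_not_mem h]) h
    · have h1 : pvMu adj v' = pvMu adj visited := by
        refine (pvMu_congr (fun x hx => ?_)).symm
        simp only [v', PySem.Set.add_of_not_mem h, List.mem_append, List.mem_singleton]
        constructor
        · exact Or.inl
        · rintro (hxv | rfl)
          · exact hxv
          · exact absurd hx hU
      rw [h1]
      apply Prod.Lex.right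
      simp [pvU_not_key hU]

def compute_blast_radius (reverse_adj : List (String × List String)) :
    List (String × List String) :=
  ((reverse_adj.map Prod.fst).foldl
    (fun blast start_node =>
      PySem.Dict.insert blast start_node
        (bfsQ reverse_adj PySem.Set.empty (pvAdjGet reverse_adj start_node)))
    PySem.Dict.empty).items

-- ===== PORT B =====
-- Source B's helper: successors(seq) = [m for n in seq for m in reverse_adj.get(n, [])]
def pvSuccessors (adj : List (String × List String)) (seq : List String) : List String :=
  seq.flatMap (fun n => pvAdjGet adj n)

-- termination measure for the fixpoint loop, and the decrease lemma its decreasing_by cites;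
-- scanF ("dedup relative to an already-present prefix") is the proof device relating dedup to it
def pvNu (adj : List (String × List String)) (seq : List String) : Nat :=
  2 * (pvU adj).countP (fun x => !decide (x ∈ seq)) + (if seq.Nodup then 0 else 1)

def scanF (visited : PySem.Set String) (fr : List String) : PySem.Set String × List String :=
  match fr with
  | [] => (visited, [])
  | n :: t =>
    if n ∈ visited then scanF visited t
    else
      let p := scanF (PySem.Set.add visited n) t
      (p.1, n :: p.2)

theorem scanF_fst (v : PySem.Set String) (fr : List String) :
    (scanF v fr).1 = v ++ (scanF v fr).2 := by
  induction fr generalizing v with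
  | nil => simp [scanF]
  | cons n t ih =>
    by_cases h : n ∈ v
    · simpa [scanF, h] using ih v
    · simp only [scanF, h, if_false]
      rw [ih (PySem.Set.add v n), PySem.Set.add_of_not_mem h]
      simp

theorem scanF_snd_not_mem (v : PySem.Set String) (fr : List String) :
    ∀ x ∈ (scanF v fr).2, x ∉ v := by
  induction fr generalizing v with
  | nil => simp [scanF]
  | cons n t ih =>
    by_cases h : n ∈ v
    · simpa [scanF, h] using ih v
    · simp only [scanF, h, if_false]
      intro x hx
      rcases List.mem_cons.mp hx with rfl | hx'
      · exact h
      · intro hxv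
        exact ih (PySem.Set.add v n) x hx'
          (by rw [PySem.Set.add_of_not_mem h]; exact List.mem_append_left _ hxv)

theorem scanF_snd_subset (v : PySem.Set String) (fr : List String) :
    ∀ x ∈ (scanF v fr).2, x ∈ fr := by
  induction fr generalizing v with
  | nil => simp [scanF]
  | cons n t ih =>
    by_cases h : n ∈ v
    · intro x hx
      exact List.mem_cons_of_mem _ (ih v x (by simpa [scanF, h] using hx))
    · simp only [scanF, h, if_false]
      intro x hx
      rcases List.mem_cons.mp hx with rfl | hx'
      · exact List.mem_cons_self
      · exact List.mem_cons_of_mem _ (ih (PySem.Set.add v n) x hx')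

theorem foldl_add_eq_scanF (fr : List String) (v : PySem.Set String) :
    fr.foldl PySem.Set.add v = (scanF v fr).1 := by
  induction fr generalizing v with
  | nil => simp [scanF]
  | cons n t ih =>
    by_cases h : n ∈ v
    · simp only [List.foldl_cons, PySem.Set.add_of_mem h, scanF, h, if_true]
      exact ih v
    · simp only [List.foldl_cons, scanF, h, if_false]
      exact ih (PySem.Set.add v n)

theorem update_eq_foldl_add (f : List String) (v : PySem.Set String) :
    PySem.Set.update v f = f.foldl PySem.Set.add v := by
  induction f generalizing v with
  | nil => simp [PySem.Set.update]
  | cons n t ih => rw [PySem.Set.update_cons, List.foldl_cons]; exact ih _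

theorem dedup_append_scanF {v : List String} (hnd : v.Nodup) (f : List String) :
    PySem.List.dedup (v ++ f) = v ++ (scanF v f).2 := by
  rw [PySem.List.dedup_eq_ofList, PySem.Set.ofList_append,
    PySem.Set.ofList_eq_self_of_nodup _ hnd, update_eq_foldl_add,
    foldl_add_eq_scanF, scanF_fst]

theorem pvNu_lt (adj : List (String × List String)) (seq : List String)
    (h : ¬ (PySem.List.dedup (seq ++ pvSuccessors adj seq)).length = seq.length) :
    pvNu adj (PySem.List.dedup (seq ++ pvSuccessors adj seq)) < pvNu adj seq := by
  set ext := PySem.List.dedup (seq ++ pvSuccessors adj seq) with hext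
  have hsub : ∀ x ∈ seq, x ∈ ext := by
    intro x hx
    rw [hext, PySem.List.mem_dedup]
    exact List.mem_append_left _ hx
  have hextnd : ext.Nodup := by rw [hext]; exact PySem.List.nodup_dedup _
  by_cases hnd : seq.Nodup
  · have hsplit : ext = seq ++ (scanF seq (pvSuccessors adj seq)).2 := by
      rw [hext]; exact dedup_append_scanF hnd _
    cases hnews : (scanF seq (pvSuccessors adj seq)).2 with
    | nil => exact absurd (by rw [hsplit, hnews, List.append_nil]) h
    | cons x t =>
      have hxnews : x ∈ (scanF seq (pvSuccessors adj seq)).2 := by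
        rw [hnews]; exact List.mem_cons_self
      have hxext : x ∈ ext := by
        rw [hsplit]; exact List.mem_append_right _ hxnews
      have hxseq : x ∉ seq := scanF_snd_not_mem seq _ x hxnews
      have hxU : x ∈ pvU adj := by
        have := scanF_snd_subset seq _ x hxnews
        obtain ⟨n, _, hxn⟩ := List.mem_flatMap.mp this
        exact mem_pvAdjGet_pvU hxn
      have hlt := countP_notMem_lt hsub hxU hxext hxseq
      simp only [pvNu, hextnd, hnd, if_true]
      omega
  · have hle := countP_notMem_le hsub (pvU adj)
    simp only [pvNu, hextnd, hnd, if_true, if_false]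
    omega

-- port of B's inner loop: iterate R -> dedup(R + successors(R)) until the size stops growing
def expandFix (adj : List (String × List String)) (seq : List String) : List String :=
  if (PySem.List.dedup (seq ++ pvSuccessors adj seq)).length = seq.length then seq
  else expandFix adj (PySem.List.dedup (seq ++ pvSuccessors adj seq))
termination_by pvNu adj seq
decreasing_by exact pvNu_lt adj seq (by assumption)

def compute_blast_radius_alt (reverse_adj : List (String × List String)) :
    List (String × List String) :=
  ((reverse_adj.map Prod.fst).foldl
    (fun blast start_node =>
      PySem.Dict.insert blast start_node
        (PySem.Set.ofList
          (expandFix reverse_adj (PySem.List.dedup (pvAdjGet reverse_adj start_node)))))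
    PySem.Dict.empty).items

-- ===== PRECONDITION & SPEC =====
def Spec_compute_blast_radius (reverse_adj : List (String × List String)) (out : List (String × List String)) : Prop := out = compute_blast_radius_alt reverse_adj
instance (reverse_adj : List (String × List String)) (out : List (String × List String)) : Decidable (Spec_compute_blast_radius reverse_adj out) := by unfold Spec_compute_blast_radius; infer_instance

-- ===== CLAIM (what is proved, stated in full; the proofs are below) =====
def Claim_equal_compute_blast_radius : Prop := ∀ (reverse_adj : List (String × List String)), Dom_compute_blast_radius reverse_adj → Spec_compute_blast_radius reverse_adj (compute_blast_radius reverse_adj)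

-- ===== LEMMAS AND PROOFS =====

-- a queue element already in visited may be deleted: it is skipped when popped
theorem bfsQ_skip (adj : List (String × List String)) (v : PySem.Set String)
    (q1 : List String) (x : String) (q2 : List String) (hx : x ∈ v) :
    bfsQ adj v (q1 ++ x :: q2) = bfsQ adj v (q1 ++ q2) := by
  match q1 with
  | [] =>
    rw [List.nil_append, List.nil_append, bfsQ]
    simp [hx]
  | h1 :: t1 =>
    by_cases hh : h1 ∈ v
    · rw [List.cons_append, bfsQ, List.cons_append, bfsQ]
      simp only [hh, dif_pos]
      exact bfsQ_skip adj v t1 x q2 hx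
    · rw [List.cons_append, bfsQ, List.cons_append, bfsQ]
      simp only [hh, dif_neg, not_false_iff]
      have hx' : x ∈ PySem.Set.add v h1 := by
        rw [PySem.Set.add_of_not_mem hh]; exact List.mem_append_left _ hx
      have := bfsQ_skip adj (PySem.Set.add v h1) t1 x
        (q2 ++ (pvAdjGet adj h1).filter
          (fun m => decide (m ∉ PySem.Set.add v h1))) hx'
      simpa [List.append_assoc] using this
termination_by (pvMu adj v, (q1 ++ x :: q2).length)
decreasing_by
  · exact Prod.Lex.right _ (by simp)
  · by_cases hU : h1 ∈ pvU adj
    · apply Prod.Lex.left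
      exact pvMu_lt (v := v)
        (fun y hy => by simp [PySem.Set.add_of_not_mem hh, hy]) hU
        (by simp [PySem.Set.add_of_not_mem hh]) hh
    · have h1eq : pvMu adj (PySem.Set.add v h1) = pvMu adj v := by
        refine (pvMu_congr (fun y hy => ?_)).symm
        simp only [PySem.Set.add_of_not_mem hh, List.mem_append, List.mem_singleton]
        constructor
        · exact Or.inl
        · rintro (hyv | rfl)
          · exact hyv
          · exact absurd hy hU
      rw [h1eq]
      apply Prod.Lex.right
      simp [pvU_not_key hU]

-- queue elements filtered out by a predicate implying "already visited" do not matter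
theorem bfsQ_filter (adj : List (String × List String)) (v : PySem.Set String)
    (l : List String) (P : String → Bool) (p r : List String)
    (hP : ∀ x ∈ l, P x = false → x ∈ v) :
    bfsQ adj v (p ++ l.filter P ++ r) = bfsQ adj v (p ++ (l ++ r)) := by
  induction l generalizing p with
  | nil => simp
  | cons a l' ih =>
    by_cases hPa : P a = true
    · have h1 := ih (p ++ [a]) (fun x hx hf => hP x (List.mem_cons_of_mem a hx) hf)
      rw [List.filter_cons, if_pos hPa]
      calc bfsQ adj v (p ++ a :: List.filter P l' ++ r)
          = bfsQ adj v ((p ++ [a]) ++ List.filter P l' ++ r) := by simp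
        _ = bfsQ adj v ((p ++ [a]) ++ (l' ++ r)) := h1
        _ = bfsQ adj v (p ++ (a :: l' ++ r)) := by simp
    · have hav : a ∈ v := hP a List.mem_cons_self (by simpa using hPa)
      have h1 := ih p (fun x hx hf => hP x (List.mem_cons_of_mem a hx) hf)
      have h2 := bfsQ_skip adj v p a (l' ++ r) hav
      rw [List.filter_cons, if_neg hPa, h1, ← h2]
      simp

-- collapsing one whole level of bfsQ into a scanF step
theorem bfsQ_level (adj : List (String × List String)) (q : List String) :
    ∀ (v : PySem.Set String) (tail : List String),
      bfsQ adj v (q ++ tail)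
        = bfsQ adj (scanF v q).1
            (tail ++ (scanF v q).2.flatMap (fun n => pvAdjGet adj n)) := by
  induction q with
  | nil => intro v tail; simp [scanF]
  | cons n q' ih =>
    intro v tail
    by_cases h : n ∈ v
    · rw [List.cons_append, bfsQ]
      simp only [h, dif_pos]
      rw [ih v tail]
      simp [scanF, h]
    · rw [List.cons_append, bfsQ]
      simp only [h, dif_neg, not_false_iff]
      set v' := PySem.Set.add v n with hv'
      have step := ih v' (tail ++ (pvAdjGet adj n).filter (fun m => decide (m ∉ v')))
      have hfil := bfsQ_filter adj (scanF v' q').1 (pvAdjGet adj n)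
        (fun m => decide (m ∉ v')) tail
        ((scanF v' q').2.flatMap (fun m => pvAdjGet adj m))
        (fun x _ hf => by
          have hxv' : x ∈ v' := by simpa using hf
          rw [scanF_fst]; exact List.mem_append_left _ hxv')
      have hscan : scanF v (n :: q') = ((scanF v' q').1, n :: (scanF v' q').2) := by
        simp [scanF, h, hv']
      rw [hscan]
      simp only [List.flatMap_cons]
      calc bfsQ adj v' (q' ++ tail ++ (pvAdjGet adj n).filter (fun m => decide (m ∉ v')))
          = bfsQ adj v' (q' ++ (tail ++ (pvAdjGet adj n).filter (fun m => decide (m ∉ v')))) := by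
            rw [List.append_assoc]
        _ = bfsQ adj (scanF v' q').1
              ((tail ++ (pvAdjGet adj n).filter (fun m => decide (m ∉ v')))
                ++ (scanF v' q').2.flatMap (fun m => pvAdjGet adj m)) := step
        _ = bfsQ adj (scanF v' q').1
              (tail ++ (pvAdjGet adj n).filter (fun m => decide (m ∉ v'))
                ++ (scanF v' q').2.flatMap (fun m => pvAdjGet adj m)) := by
            rw [List.append_assoc]
        _ = bfsQ adj (scanF v' q').1
              (tail ++ (pvAdjGet adj n ++ (scanF v' q').2.flatMap (fun m => pvAdjGet adj m))) := hfil

-- the fixpoint loop, started from a nodup set, computes the BFS closure in BFS order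
theorem fix_eq_bfsQ (adj : List (String × List String)) (seq : List String)
    (hnd : seq.Nodup) :
    PySem.Set.ofList (expandFix adj seq) = bfsQ adj seq (pvSuccessors adj seq) := by
  rw [expandFix]
  have hsplit : PySem.List.dedup (seq ++ pvSuccessors adj seq)
      = seq ++ (scanF seq (pvSuccessors adj seq)).2 := dedup_append_scanF hnd _
  have hlevel := bfsQ_level adj (pvSuccessors adj seq) seq []
  rw [List.append_nil, List.nil_append] at hlevel
  by_cases h : (PySem.List.dedup (seq ++ pvSuccessors adj seq)).length = seq.length
  · rw [if_pos h]
    have hnil : (scanF seq (pvSuccessors adj seq)).2 = [] := by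
      rw [hsplit, List.length_append] at h
      have hlen : (scanF seq (pvSuccessors adj seq)).2.length = 0 := by omega
      exact List.eq_nil_of_length_eq_zero hlen
    rw [hlevel, scanF_fst, hnil, List.append_nil, List.flatMap_nil, bfsQ,
      PySem.Set.ofList_eq_self_of_nodup _ hnd]
  · rw [if_neg h]
    have hextnd : (PySem.List.dedup (seq ++ pvSuccessors adj seq)).Nodup :=
      PySem.List.nodup_dedup _
    have ih := fix_eq_bfsQ adj (PySem.List.dedup (seq ++ pvSuccessors adj seq)) hextnd
    rw [ih, hlevel, scanF_fst]
    -- both sides are bfsQ from visited = seq ++ news; align the queues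
    rw [hsplit]
    set news := (scanF seq (pvSuccessors adj seq)).2 with hnews
    have hflat : pvSuccessors adj (seq ++ news)
        = pvSuccessors adj seq ++ news.flatMap (fun n => pvAdjGet adj n) := by
      simp [pvSuccessors]
    rw [hflat]
    have hP : ∀ x ∈ pvSuccessors adj seq, (fun _ : String => false) x = false → x ∈ seq ++ news := by
      intro x hx _
      rw [← hsplit, PySem.List.mem_dedup]
      exact List.mem_append_right _ hx
    have := bfsQ_filter adj (seq ++ news) (pvSuccessors adj seq) (fun _ => false) []
      (news.flatMap (fun n => pvAdjGet adj n)) hP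
    simp only [List.filter_false, List.nil_append] at this
    rw [this]
termination_by pvNu adj seq
decreasing_by exact pvNu_lt adj seq (by assumption)

-- per start node, B's fixpoint value equals A's BFS value (same list, BFS order)
theorem value_eq (adj : List (String × List String)) (q : List String) :
    PySem.Set.ofList (expandFix adj (PySem.List.dedup q))
      = bfsQ adj PySem.Set.empty q := by
  have hdq : PySem.List.dedup ([] ++ q) = [] ++ (scanF [] q).2 :=
    dedup_append_scanF List.nodup_nil q
  rw [List.nil_append, List.nil_append] at hdq
  have hlevel := bfsQ_level adj q [] []
  rw [List.append_nil, List.nil_append] at hlevel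
  have h1 : bfsQ adj PySem.Set.empty q
      = bfsQ adj (PySem.List.dedup q) (pvSuccessors adj (PySem.List.dedup q)) := by
    show bfsQ adj ([] : PySem.Set String) q = _
    rw [hlevel, scanF_fst, List.nil_append, ← hdq, pvSuccessors]
  rw [h1]
  exact fix_eq_bfsQ adj (PySem.List.dedup q) (PySem.List.nodup_dedup q)

-- ===== VERDICT (by name: the statement is the Claim_ definition above) =====
theorem compute_blast_radius_spec : Claim_equal_compute_blast_radius := by
  intro reverse_adj _
  unfold Spec_compute_blast_radius compute_blast_radius compute_blast_radius_alt
  simp only [value_eq]
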